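-- pv_equiv track=rewrite | github.com/juanzo007/Finance_v1-0 | scripts/tools/utils.py | is_section_marker
-- ===== SOURCE A (Python) =====
-- def is_section_marker(line: str) -> bool:
--     """
--     Check if a line indicates the start of a new section (stop parsing names)
--
--     Args:
--         line: Text line to check
--
--     Returns:
--         bool: True if this line marks a section boundary
--     """
--     line_lower = line.lower().strip()
--
--     section_markers = [
--         "service code",
--         "merchant id",
--         "fee",
--         "note",
--         "bank reference",
--         "promptpay",
--         "prompt pay",
--         "biller id",
--         "ref no",
--         "reference",
--         "top up",
--         "g-wallet",
--         "k plus wallet",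
--         "e-wallet",
--         "transaction reference",
--     ]
--
--     return any(marker in line_lower for marker in section_markers)
-- ===== SOURCE B (Python) =====
-- _SECTION_MARKERS = (
--     "service code",
--     "merchant id",
--     "fee",
--     "note",
--     "bank reference",
--     "promptpay",
--     "prompt pay",
--     "biller id",
--     "ref no",
--     "reference",
--     "top up",
--     "g-wallet",
--     "k plus wallet",
--     "e-wallet",
--     "transaction reference",
-- )
--
--
-- def is_section_marker(line: str) -> bool:
--     # Single left-to-right pass: at each position, test whether some marker
--     # starts there (what a compiled alternation regex would do), instead of
--     # one full substring scan per marker.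
--     t = line.lower().strip()
--     for i in range(len(t)):
--         for m in _SECTION_MARKERS:
--             if t.startswith(m, i):
--                 return True
--     return False
-- ===== Notes on version B (the rewrite author's own statement) =====
-- stated objective: alternative
-- what changed: Replaced the per-marker full substring scan (one 'marker in line' pass per marker) with a single left-to-right scan over line positions that tests at each position whether any marker starts there, as a compiled alternation regex would.
import Mathlib
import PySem

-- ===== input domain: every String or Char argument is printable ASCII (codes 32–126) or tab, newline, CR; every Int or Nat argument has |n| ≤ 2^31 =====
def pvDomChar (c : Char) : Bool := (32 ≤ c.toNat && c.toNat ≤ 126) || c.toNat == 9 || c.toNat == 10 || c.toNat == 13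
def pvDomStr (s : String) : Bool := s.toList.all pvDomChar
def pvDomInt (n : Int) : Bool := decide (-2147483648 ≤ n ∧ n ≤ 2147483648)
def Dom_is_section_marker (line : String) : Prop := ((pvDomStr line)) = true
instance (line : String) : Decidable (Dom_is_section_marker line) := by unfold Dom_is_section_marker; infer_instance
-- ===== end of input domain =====

-- B replaces A's one-full-substring-scan-per-marker with a single left-to-right
-- scan over positions, testing at each position whether some marker starts there.

-- shared data: the marker list (identical literal in both Pythons)
def sectionMarkers : List String :=
  ["service code", "merchant id", "fee", "note", "bank reference", "promptpay",
   "prompt pay", "biller id", "ref no", "reference", "top up", "g-wallet",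
   "k plus wallet", "e-wallet", "transaction reference"]

-- ===== PORT A =====
def is_section_marker (line : String) : Bool :=
  let line_lower := PySem.Str.strip (PySem.Str.lower line)
  sectionMarkers.any (fun marker => PySem.Str.isIn marker line_lower)

-- ===== PORT B =====
-- t.startswith(m, i) with 0 ≤ i ≤ len(t) is exactly: m is a prefix of t dropped by i.
def is_section_marker_alt (line : String) : Bool :=
  let t := PySem.Str.strip (PySem.Str.lower line)
  (List.range t.toList.length).any (fun i =>
    sectionMarkers.any (fun m => PySem.Chars.startswith (t.toList.drop i) m.toList))

-- ===== PRECONDITION & SPEC =====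
def Spec_is_section_marker (line : String) (out : Bool) : Prop := out = is_section_marker_alt line
instance (line : String) (out : Bool) : Decidable (Spec_is_section_marker line out) := by unfold Spec_is_section_marker; infer_instance

-- ===== CLAIM (what is proved, stated in full; the proofs are below) =====
def Claim_equal_is_section_marker : Prop := ∀ (line : String), Dom_is_section_marker line → Spec_is_section_marker line (is_section_marker line)

-- ===== LEMMAS AND PROOFS =====

theorem sectionMarkers_ne_nil : ∀ m ∈ sectionMarkers, m.toList ≠ [] := by
  intro m hm; fin_cases hm <;> simp

theorem is_section_marker_eq_alt (line : String) :
    is_section_marker line = is_section_marker_alt line := by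
  simp only [is_section_marker, is_section_marker_alt]
  rw [Bool.eq_iff_iff]
  simp only [List.any_eq_true, List.mem_range, PySem.Str.isIn_eq,
    PySem.Chars.startswith_iff]
  constructor
  · rintro ⟨m, hm, hin⟩
    obtain ⟨j, hj⟩ := (PySem.Chars.exists_prefix_drop_iff_isIn _ _).mpr hin
    refine ⟨j, ?_, m, hm, hj⟩
    by_contra h
    push Not at h
    rw [List.drop_eq_nil_of_le h] at hj
    exact sectionMarkers_ne_nil m hm (List.prefix_nil.mp hj)
  · rintro ⟨i, _, m, hm, hpre⟩
    exact ⟨m, hm, (PySem.Chars.exists_prefix_drop_iff_isIn _ _).mp ⟨i, hpre⟩⟩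

-- ===== VERDICT (by name: the statement is the Claim_ definition above) =====
theorem is_section_marker_spec : Claim_equal_is_section_marker := by
  intro line _
  exact is_section_marker_eq_alt line
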